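-- pv_equiv track=rewrite | github.com/dansuh17/dansuh_algorithms | python/research_center.py | bfs
-- ===== SOURCE A (Python) =====
-- from collections import deque
--
-- def bfs(map, viruses, n, m):
--     # CAUTION: visited[[False] * m] * n => will produce WRONG results
--     visited = [[False] * m for _ in range(n)]
--     offsets = [(0, 1), (1, 0), (0, -1), (-1, 0)]
--
--     # conduct bfs on all virus coordinates
--     queue = deque()
--     for virus in viruses:
--         queue.append(virus)
--
--     while len(queue) > 0:
--         infected = queue.popleft()
--         for offset in offsets:
--             new_x = infected[0] + offset[0]
--             new_y = infected[1] + offset[1]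
--
--             if 0 <= new_x < n and 0 <= new_y < m:
--                 if map[new_x][new_y] == 0 and not visited[new_x][new_y]:
--                     queue.append((new_x, new_y))
--                     visited[new_x][new_y] = True
--                     map[new_x][new_y] = 2
--
--     # count the number of remaining clean area
--     free_space = 0
--     for row in map:
--         free_space += row.count(0)
--
--     return free_space
-- ===== SOURCE B (Python) =====
-- def bfs(map, viruses, n, m):
--     # Fixed-point saturation instead of a BFS queue: seed the clean cells next to a
--     # virus, then sweep the grid until no new cell becomes infected.
--     # Mutates `map` the same way the original does (infected 0-cells are set to 2).
--     offsets = ((0, 1), (1, 0), (0, -1), (-1, 0))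
--
--     def in_bounds(x, y):
--         return 0 <= x < n and 0 <= y < m
--
--     infected = set()
--     for virus in viruses:
--         for dx, dy in offsets:
--             nx, ny = virus[0] + dx, virus[1] + dy
--             if in_bounds(nx, ny) and map[nx][ny] == 0:
--                 infected.add((nx, ny))
--
--     changed = True
--     while changed:
--         changed = False
--         for x in range(n):
--             for y in range(m):
--                 if map[x][y] == 0 and (x, y) not in infected:
--                     if any(in_bounds(x + dx, y + dy) and (x + dx, y + dy) in infected
--                            for dx, dy in offsets):
--                         infected.add((x, y))
--                         changed = True
--
--     for x, y in infected:
--         map[x][y] = 2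
--
--     free_space = 0
--     for row in map:
--         free_space += row.count(0)
--     return free_space
-- ===== Notes on version B (the rewrite author's own statement) =====
-- stated objective: alternative
-- what changed: Replaced the deque-based BFS flood fill by a seed-then-saturate fixed point: collect the clean cells adjacent to any virus into a set, then repeatedly sweep the whole grid adding clean cells adjacent to the infected set until a sweep changes nothing, finally mutating the map and counting zeros like A.
-- outside the precondition, e.g. on bfs([[0]], [], 5, 1): A returns 1, B raises IndexError
import Mathlib
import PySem

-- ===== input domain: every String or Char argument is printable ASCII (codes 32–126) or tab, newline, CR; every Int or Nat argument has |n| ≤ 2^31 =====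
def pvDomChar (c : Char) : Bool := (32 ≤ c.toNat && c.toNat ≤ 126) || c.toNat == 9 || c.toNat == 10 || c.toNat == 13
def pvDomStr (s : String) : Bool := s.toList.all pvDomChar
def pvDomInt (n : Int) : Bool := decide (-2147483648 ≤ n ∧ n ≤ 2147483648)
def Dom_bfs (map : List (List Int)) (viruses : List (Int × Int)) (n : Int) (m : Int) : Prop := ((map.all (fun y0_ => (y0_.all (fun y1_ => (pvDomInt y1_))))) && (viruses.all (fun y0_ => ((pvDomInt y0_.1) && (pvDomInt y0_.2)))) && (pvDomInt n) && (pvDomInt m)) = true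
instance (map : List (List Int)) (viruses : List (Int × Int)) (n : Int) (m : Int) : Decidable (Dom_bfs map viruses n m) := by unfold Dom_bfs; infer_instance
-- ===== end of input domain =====

-- B replaces A's deque BFS by a seed-then-saturate fixed-point sweep over the grid (objective: alternative).
-- Python A mutates `map` in place (infected 0-cells become 2); Python B performs the same mutation; the
-- equivalence proved here is about the RETURN value.

-- Shared grid primitives (both Pythons read `map[x][y]` / write `map[x][y] = v` only at indices with
-- 0 ≤ x < n, 0 ≤ y < m, which Pre_bfs guarantees to be in range, so `getD`/`set` at `toNat` indices is exact).
def atG {α : Type} (g : List (List α)) (d : α) (i j : Nat) : α := (g.getD i []).getD j d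
def setG {α : Type} (g : List (List α)) (i j : Nat) (a : α) : List (List α) := g.set i ((g.getD i []).set j a)

-- the literal `offsets` tuple both Pythons define
def offs : List (Int × Int) := [(0, 1), (1, 0), (0, -1), (-1, 0)]

-- ===== PORT A =====
-- visited grids that `bfsLoop` works on keep the shape [[False]*m for _ in range(n)]
def shapeV (n m : Int) (v : List (List Bool)) : Prop :=
  v.length = n.toNat ∧ ∀ r ∈ v, r.length = m.toNat

-- termination measure: marking flips one `false` entry, each pop removes one queue element
def falseCt (v : List (List Bool)) : Nat := (v.map (fun r => r.count false)).sum

-- body of the `for offset in offsets` loop: state = (map, visited, queue)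
def stepA (n m : Int) (c : Int × Int)
    (st : List (List Int) × List (List Bool) × List (Int × Int)) (off : Int × Int) :
    List (List Int) × List (List Bool) × List (Int × Int) :=
  let nx := c.1 + off.1
  let ny := c.2 + off.2
  if 0 ≤ nx ∧ nx < n ∧ 0 ≤ ny ∧ ny < m then
    if atG st.1 0 nx.toNat ny.toNat = 0 ∧ atG st.2.1 false nx.toNat ny.toNat = false then
      (setG st.1 nx.toNat ny.toNat 2, setG st.2.1 nx.toNat ny.toNat true, st.2.2 ++ [(nx, ny)])
    else st
  else st

-- basic facts about the shared grid primitives (used by the ports' termination argument)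
theorem length_setG {α : Type} (g : List (List α)) (i j : Nat) (a : α) :
    (setG g i j a).length = g.length := by
  simp [setG]

theorem setG_of_length_le {α : Type} {g : List (List α)} {i : Nat} (h : g.length ≤ i)
    (j : Nat) (a : α) : setG g i j a = g :=
  List.set_eq_of_length_le (by simpa using h)

theorem getD_eq_elem {α : Type} {l : List α} {j : Nat} (h : j < l.length) (d : α) :
    l.getD j d = l[j] := by
  rw [List.getD_eq_getElem?_getD, List.getElem?_eq_getElem h]
  rfl

theorem getD_mem {α : Type} {l : List α} {i : Nat} (d : α) (hi : i < l.length) :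
    l.getD i d ∈ l := by
  rw [List.getD_eq_getElem?_getD, List.getElem?_eq_getElem hi]
  exact List.getElem_mem hi

theorem shapeV_setG {n m : Int} {v : List (List Bool)} (hv : shapeV n m v) (i j : Nat)
    (a : Bool) : shapeV n m (setG v i j a) := by
  rcases Nat.lt_or_ge i v.length with hi | hi
  · obtain ⟨h1, h2⟩ := hv
    refine ⟨by simp [length_setG, h1], ?_⟩
    intro r hr
    rcases List.mem_or_eq_of_mem_set hr with h | h
    · exact h2 r h
    · subst h
      rw [List.length_set]
      exact h2 _ (getD_mem [] hi)
  · rw [setG_of_length_le hi]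
    exact hv

def ct2 {α : Type} [BEq α] (g : List (List α)) (b : α) : Nat :=
  (g.map (fun r => r.count b)).sum

theorem falseCt_eq_ct2 (v : List (List Bool)) : falseCt v = ct2 v false := rfl

theorem ct2_setG {α : Type} [BEq α] [LawfulBEq α] {g : List (List α)} {i j : Nat} {a b : α}
    (hi : i < g.length) (hj : j < (g.getD i []).length)
    (hold : (g.getD i []).getD j b = b) (hne : a ≠ b) :
    ct2 (setG g i j a) b + 1 = ct2 g b := by
  induction g generalizing i with
  | nil => simp at hi
  | cons r t ih =>
      cases i with
      | zero =>
          simp only [List.getD_cons_zero] at hj hold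
          have hval : r[j] = b := by rw [← hold]; exact (getD_eq_elem hj b).symm
          have hrow : (r.set j a).count b + 1 = r.count b := by
            have := List.count_set (a := a) (b := b) (l := r) (i := j) hj
            simp [hval, hne] at this
            have hpos : 0 < r.count b := by
              have : b ∈ r := hval ▸ List.getElem_mem hj
              simpa [List.count_pos_iff] using this
            omega
          simp only [setG, List.getD_cons_zero, List.set_cons_zero, ct2, List.map_cons,
            List.sum_cons]
          omega
      | succ i' =>
          simp only [List.length_cons, Nat.succ_lt_succ_iff] at hi
          simp only [List.getD_cons_succ] at hj hold
          have := ih hi hj hold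
          simp only [setG, List.getD_cons_succ, List.set_cons_succ, ct2, List.map_cons,
            List.sum_cons] at this ⊢
          omega

theorem stepA_shape {n m : Int} {c : Int × Int} {st :
    List (List Int) × List (List Bool) × List (Int × Int)} {off : Int × Int}
    (h : shapeV n m st.2.1) : shapeV n m (stepA n m c st off).2.1 := by
  unfold stepA
  dsimp only
  split_ifs with h1 h2 <;> first | exact shapeV_setG h _ _ _ | exact h

theorem foldl_stepA_shape {n m : Int} {c : Int × Int} {L : List (Int × Int)} {st :
    List (List Int) × List (List Bool) × List (Int × Int)}
    (h : shapeV n m st.2.1) : shapeV n m (L.foldl (stepA n m c) st).2.1 := by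
  induction L generalizing st with
  | nil => exact h
  | cons o t ih => exact ih (stepA_shape h)

theorem stepA_measure {n m : Int} {c : Int × Int} {st :
    List (List Int) × List (List Bool) × List (Int × Int)} {off : Int × Int}
    (h : shapeV n m st.2.1) :
    5 * falseCt (stepA n m c st off).2.1 + (stepA n m c st off).2.2.length ≤
      5 * falseCt st.2.1 + st.2.2.length := by
  unfold stepA
  dsimp only
  split_ifs with h1 h2
  · -- a fresh cell is marked: falseCt drops by one, the queue grows by one
    obtain ⟨hx0, hxn, hy0, hym⟩ := h1
    have hi : (c.1 + off.1).toNat < st.2.1.length := by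
      rw [h.1]; omega
    have hj : (c.2 + off.2).toNat < (st.2.1.getD (c.1 + off.1).toNat []).length := by
      rw [h.2 _ (getD_mem [] hi)]; omega
    have := ct2_setG (a := true) (b := false) hi hj (by simpa [atG] using h2.2) (by simp)
    simp only [falseCt_eq_ct2, List.length_append, List.length_cons, List.length_nil]
    omega
  · exact le_refl _
  · exact le_refl _

theorem foldl_stepA_measure {n m : Int} {c : Int × Int} {L : List (Int × Int)} {st :
    List (List Int) × List (List Bool) × List (Int × Int)}
    (h : shapeV n m st.2.1) :
    5 * falseCt (L.foldl (stepA n m c) st).2.1 + (L.foldl (stepA n m c) st).2.2.length ≤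
      5 * falseCt st.2.1 + st.2.2.length := by
  induction L generalizing st with
  | nil => exact le_refl _
  | cons o t ih => exact le_trans (ih (stepA_shape h)) (stepA_measure h)

-- `while len(queue) > 0:` (shape of `visited` carried for the termination measure)
def bfsLoop (n m : Int) (g : List (List Int)) (v : List (List Bool)) (q : List (Int × Int))
    (hv : shapeV n m v) : List (List Int) :=
  match q with
  | [] => g
  | c :: rest =>
      let st := offs.foldl (stepA n m c) (g, v, rest)
      bfsLoop n m st.1 st.2.1 st.2.2 (foldl_stepA_shape hv)
termination_by 5 * falseCt v + q.length
decreasing_by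
  have := foldl_stepA_measure (n := n) (m := m) (c := c) (L := offs) (st := (g, v, rest)) hv
  simp only [List.length_cons] at this ⊢
  omega

theorem shapeV_replicate (n m : Int) :
    shapeV n m (List.replicate n.toNat (List.replicate m.toNat false)) := by
  constructor
  · exact List.length_replicate
  · intro r hr
    rw [List.eq_of_mem_replicate hr]
    exact List.length_replicate

def bfs (map : List (List Int)) (viruses : List (Int × Int)) (n : Int) (m : Int) : Int :=
  let visited : List (List Bool) := List.replicate n.toNat (List.replicate m.toNat false)
  -- for virus in viruses: queue.append(virus)
  let queue : List (Int × Int) := viruses.foldl (fun q c => q ++ [c]) []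
  let final := bfsLoop n m map visited queue (shapeV_replicate n m)
  -- free_space = 0; for row in map: free_space += row.count(0)
  final.foldl (fun acc row => acc + (PySem.List.count row 0 : Int)) 0

-- ===== PORT B =====
def inB (n m x y : Int) : Bool := decide (0 ≤ x ∧ x < n ∧ 0 ≤ y ∧ y < m)

-- seed pass: clean cells next to a virus
def seedsB (g : List (List Int)) (n m : Int) (viruses : List (Int × Int)) : PySem.Set (Int × Int) :=
  viruses.foldl (fun s c =>
    offs.foldl (fun s off =>
      let nx := c.1 + off.1
      let ny := c.2 + off.2
      if inB n m nx ny ∧ atG g 0 nx.toNat ny.toNat = 0 then PySem.Set.add s (nx, ny) else s) s)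
    PySem.Set.empty

-- one `for x in range(n): for y in range(m): …` sweep; second component = `changed`
def passB (g : List (List Int)) (n m : Int) (s0 : PySem.Set (Int × Int)) :
    PySem.Set (Int × Int) × Bool :=
  (PySem.List.pyRange 0 n 1).foldl (fun st x =>
    (PySem.List.pyRange 0 m 1).foldl (fun st y =>
      if atG g 0 x.toNat y.toNat = 0 ∧ ¬ (x, y) ∈ st.1 ∧
          offs.any (fun off => inB n m (x + off.1) (y + off.2) &&
            decide ((x + off.1, y + off.2) ∈ st.1)) then
        (PySem.Set.add st.1 (x, y), true)
      else st) st) (s0, false)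

-- `while changed:` — fuel n*m+1 is a totalization guard only: every pass that continues strictly
-- enlarges `infected`, which holds distinct in-bounds cells, so at most n*m passes continue
def satB (g : List (List Int)) (n m : Int) : Nat → PySem.Set (Int × Int) → PySem.Set (Int × Int)
  | 0, s => s
  | fuel + 1, s =>
      let r := passB g n m s
      if r.2 then satB g n m fuel r.1 else r.1

def bfs_alt (map : List (List Int)) (viruses : List (Int × Int)) (n : Int) (m : Int) : Int :=
  let infected := satB map n m (n.toNat * m.toNat + 1) (seedsB map n m viruses)
  -- for x, y in infected: map[x][y] = 2   (order-independent: distinct cells each set to 2)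
  let final := infected.foldl (fun g c => setG g c.1.toNat c.2.toNat 2) map
  final.foldl (fun acc row => acc + (PySem.List.count row 0 : Int)) 0

-- ===== PRECONDITION & SPEC =====
-- Pre_bfs excludes grids lacking the indexed n×m region (unless n ≤ 0 or m ≤ 0, when nothing is indexed):
-- there A raises IndexError whenever its spread reaches a missing cell — though it can still return when
-- the spread happens never to get there (e.g. no viruses) — while B's full sweep raises.
def Pre_bfs (map : List (List Int)) (viruses : List (Int × Int)) (n : Int) (m : Int) : Prop :=
  n ≤ 0 ∨ m ≤ 0 ∨ (n.toNat ≤ map.length ∧ ∀ r ∈ map.take n.toNat, m.toNat ≤ r.length)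
instance (map : List (List Int)) (viruses : List (Int × Int)) (n : Int) (m : Int) : Decidable (Pre_bfs map viruses n m) := by unfold Pre_bfs; infer_instance

def pvWitness_bfs : List (List Int) × (List (Int × Int)) × Int × Int :=
  ([[0, 0, 1], [1, 0, 0], [0, 1, 0]], [(0, 0)], 3, 3)

def Spec_bfs (map : List (List Int)) (viruses : List (Int × Int)) (n : Int) (m : Int) (out : Int) : Prop := out = bfs_alt map viruses n m
instance (map : List (List Int)) (viruses : List (Int × Int)) (n : Int) (m : Int) (out : Int) : Decidable (Spec_bfs map viruses n m out) := by unfold Spec_bfs; infer_instance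

-- ===== CLAIM (what is proved, stated in full; the proofs are below) =====
def Claim_equal_bfs : Prop := ∀ (map : List (List Int)) (viruses : List (Int × Int)) (n : Int) (m : Int), Dom_bfs map viruses n m → Pre_bfs map viruses n m → Spec_bfs map viruses n m (bfs map viruses n m)

-- ===== LEMMAS AND PROOFS =====

theorem getD_setG_self {α : Type} {g : List (List α)} {i : Nat} (hi : i < g.length)
    (j : Nat) (a : α) : (setG g i j a).getD i [] = (g.getD i []).set j a := by
  simp [setG, List.getD_eq_getElem?_getD, List.getElem?_set_self (by simpa using hi)]

theorem getD_setG_ne {α : Type} (g : List (List α)) {i i' : Nat} (h : i ≠ i') (j : Nat)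
    (a : α) : (setG g i j a).getD i' [] = g.getD i' [] := by
  simp [setG, List.getD_eq_getElem?_getD, List.getElem?_set_ne h]



theorem getD_set_self {α : Type} {l : List α} {j : Nat} (h : j < l.length) (a d : α) :
    (l.set j a).getD j d = a := by
  rw [List.getD_eq_getElem?_getD, List.getElem?_set_self h]
  rfl

theorem getD_set_ne {α : Type} (l : List α) {j j' : Nat} (h : j ≠ j') (a d : α) :
    (l.set j a).getD j' d = l.getD j' d := by
  rw [List.getD_eq_getElem?_getD, List.getElem?_set_ne h, List.getD_eq_getElem?_getD]

theorem atG_setG_self {α : Type} {g : List (List α)} {i j : Nat} (d : α)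
    (hi : i < g.length) (hj : j < (g.getD i []).length) (a : α) :
    atG (setG g i j a) d i j = a := by
  unfold atG
  rw [getD_setG_self hi]
  exact getD_set_self hj a d

theorem atG_setG_ne {α : Type} {g : List (List α)} {i j i' j' : Nat} (d : α)
    (h : i ≠ i' ∨ j ≠ j') (a : α) : atG (setG g i j a) d i' j' = atG g d i' j' := by
  rcases h with h | h
  · unfold atG
    rw [getD_setG_ne g h]
  · rcases Nat.lt_or_ge i g.length with hi | hi
    · by_cases hii : i = i'
      · subst hii
        unfold atG
        rw [getD_setG_self hi]
        exact getD_set_ne _ h a d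
      · unfold atG
        rw [getD_setG_ne g hii]
    · rw [setG_of_length_le hi]



-- ---------- shared notions used only by the proofs ----------

def inG (n m : Int) (c : Int × Int) : Prop := 0 ≤ c.1 ∧ c.1 < n ∧ 0 ≤ c.2 ∧ c.2 < m

def nbr (c off : Int × Int) : Int × Int := (c.1 + off.1, c.2 + off.2)

-- the cells A's BFS infects = clean cells connected, through clean cells, to a neighbour of a virus
inductive Reach (g : List (List Int)) (vs : List (Int × Int)) (n m : Int) : Int × Int → Prop where
  | seed {c off : Int × Int} : c ∈ vs → off ∈ offs → inG n m (nbr c off) →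
      atG g 0 (nbr c off).1.toNat (nbr c off).2.toNat = 0 → Reach g vs n m (nbr c off)
  | step {c off : Int × Int} : Reach g vs n m c → off ∈ offs → inG n m (nbr c off) →
      atG g 0 (nbr c off).1.toNat (nbr c off).2.toNat = 0 → Reach g vs n m (nbr c off)

theorem reach_inG {g vs n m} {c : Int × Int} (h : Reach g vs n m c) :
    inG n m c ∧ atG g 0 c.1.toNat c.2.toNat = 0 := by
  cases h with
  | seed h1 h2 h3 h4 => exact ⟨h3, h4⟩
  | step h1 h2 h3 h4 => exact ⟨h3, h4⟩

theorem inB_iff {n m x y : Int} : inB n m x y = true ↔ (0 ≤ x ∧ x < n ∧ 0 ≤ y ∧ y < m) := by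
  simp [inB]

theorem offs_neg_mem {off : Int × Int} (h : off ∈ offs) : (-off.1, -off.2) ∈ offs := by
  fin_cases h <;> decide

def cells (n m : Int) : List (Int × Int) :=
  (PySem.List.pyRange 0 n 1) ×ˢ (PySem.List.pyRange 0 m 1)

theorem mem_cells {n m : Int} {p : Int × Int} : p ∈ cells n m ↔ inG n m p := by
  cases p with
  | mk a b =>
    simp [cells, inG, PySem.List.mem_pyRange_one]
    tauto

theorem nodup_cells (n m : Int) : (cells n m).Nodup :=
  List.Nodup.product (PySem.List.nodup_pyRange_one _ _) (PySem.List.nodup_pyRange_one _ _)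

theorem length_cells (n m : Int) : (cells n m).length = n.toNat * m.toNat := by
  simp [cells, List.length_product, PySem.List.length_pyRange_one]

theorem rows_setG_length {α : Type} (g : List (List α)) (i j : Nat) (a : α) (i' : Nat) :
    ((setG g i j a).getD i' []).length = (g.getD i' []).length := by
  by_cases h : i = i'
  · subst h
    rcases Nat.lt_or_ge i g.length with hi | hi
    · rw [getD_setG_self hi, List.length_set]
    · rw [setG_of_length_le hi]
  · rw [getD_setG_ne g h]

theorem ct2_setG_add {α : Type} [BEq α] [LawfulBEq α] {g : List (List α)} {i j : Nat} {b : α}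
    (hi : i < g.length) (hj : j < (g.getD i []).length)
    (hold : (g.getD i []).getD j b ≠ b) :
    ct2 (setG g i j b) b = ct2 g b + 1 := by
  induction g generalizing i with
  | nil => simp at hi
  | cons r t ih =>
      cases i with
      | zero =>
          simp only [List.getD_cons_zero] at hj hold
          have hval : r[j] ≠ b := by rw [← getD_eq_elem hj b]; exact hold
          have hrow : (r.set j b).count b = r.count b + 1 := by
            have := List.count_set (a := b) (b := b) (l := r) (i := j) hj
            simp [hval] at this
            omega
          simp only [setG, List.getD_cons_zero, List.set_cons_zero, ct2, List.map_cons,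
            List.sum_cons]
          omega
      | succ i' =>
          simp only [List.length_cons, Nat.succ_lt_succ_iff] at hi
          simp only [List.getD_cons_succ] at hj hold
          have := ih hi hj hold
          simp only [setG, List.getD_cons_succ, List.set_cons_succ, ct2, List.map_cons,
            List.sum_cons] at this ⊢
          omega

theorem atG_replicate_false (n m : Int) (i j : Nat) :
    atG (List.replicate n.toNat (List.replicate m.toNat false)) false i j = false := by
  unfold atG
  rcases Nat.lt_or_ge i n.toNat with hi | hi
  · have h1 : (List.replicate n.toNat (List.replicate m.toNat false)).getD i [] =
        List.replicate m.toNat false := by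
      rw [getD_eq_elem (by simp only [List.length_replicate]; exact hi)]
      exact List.getElem_replicate _
    rw [h1]
    rcases Nat.lt_or_ge j m.toNat with hj | hj
    · rw [getD_eq_elem (by simp only [List.length_replicate]; exact hj)]
      exact List.getElem_replicate _
    · rw [List.getD_eq_getElem?_getD,
        List.getElem?_eq_none (by simp only [List.length_replicate]; exact hj)]
      rfl
  · have h1 : (List.replicate n.toNat (List.replicate m.toNat false)).getD i [] = [] := by
      rw [List.getD_eq_getElem?_getD,
        List.getElem?_eq_none (by simp only [List.length_replicate]; exact hi)]
      rfl
    rw [h1]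
    rfl

theorem ct2_replicate_true (n m : Int) :
    ct2 (List.replicate n.toNat (List.replicate m.toNat false)) true = 0 := by
  unfold ct2
  induction n.toNat with
  | zero => simp
  | succ k ih =>
      simp_all [List.replicate_succ, List.count_replicate]

theorem foldl_count0 (g : List (List Int)) (acc : Int) :
    g.foldl (fun acc row => acc + (PySem.List.count row 0 : Int)) acc = acc + (ct2 g 0 : Nat) := by
  induction g generalizing acc with
  | nil => simp [ct2]
  | cons r t ih =>
      simp only [List.foldl_cons]
      rw [ih]
      simp only [ct2, List.map_cons, List.sum_cons, PySem.List.count_eq]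
      push_cast
      ring

-- ---------- A-side: the BFS loop maintains an invariant tying (map, visited, queue) to Reach ----------

def preShape (g0 : List (List Int)) (n m : Int) : Prop :=
  n.toNat ≤ g0.length ∧ ∀ i < n.toNat, m.toNat ≤ (g0.getD i []).length

def srcP (vs : List (Int × Int)) (v : List (List Bool)) (d : Int × Int) : Prop :=
  d ∈ vs ∨ (0 ≤ d.1 ∧ 0 ≤ d.2 ∧ atG v false d.1.toNat d.2.toNat = true)

def closedAt (g0 : List (List Int)) (vs : List (Int × Int)) (n m : Int)
    (v : List (List Bool)) (c : Int × Int) : Prop :=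
  ∀ off ∈ offs, inG n m (nbr c off) → atG g0 0 (nbr c off).1.toNat (nbr c off).2.toNat = 0 →
    atG v false (nbr c off).1.toNat (nbr c off).2.toNat = true

def InvCore (g0 : List (List Int)) (vs : List (Int × Int)) (n m : Int)
    (g : List (List Int)) (v : List (List Bool)) : Prop :=
  shapeV n m v ∧
  g.length = g0.length ∧
  (∀ i : Nat, (g.getD i []).length = (g0.getD i []).length) ∧
  (∀ i j : Nat, atG g 0 i j = if atG v false i j = true then 2 else atG g0 0 i j) ∧
  (ct2 g 0 + ct2 v true = ct2 g0 0) ∧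
  (∀ i j : Nat, atG v false i j = true → Reach g0 vs n m ((i : Int), (j : Int)))

def InvA (g0 : List (List Int)) (vs : List (Int × Int)) (n m : Int)
    (g : List (List Int)) (v : List (List Bool)) (q : List (Int × Int)) : Prop :=
  InvCore g0 vs n m g v ∧ (∀ d ∈ q, srcP vs v d) ∧
  (∀ d, srcP vs v d → d ∈ q ∨ closedAt g0 vs n m v d)

theorem srcP_mono {vs : List (Int × Int)} {v v' : List (List Bool)}
    (hm : ∀ i j : Nat, atG v false i j = true → atG v' false i j = true) {d : Int × Int}
    (hd : srcP vs v d) : srcP vs v' d := by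
  rcases hd with h | ⟨h1, h2, h3⟩
  · exact Or.inl h
  · exact Or.inr ⟨h1, h2, hm _ _ h3⟩

theorem closedAt_mono {g0 vs n m} {v v' : List (List Bool)}
    (hm : ∀ i j : Nat, atG v false i j = true → atG v' false i j = true) {c : Int × Int}
    (hc : closedAt g0 vs n m v c) : closedAt g0 vs n m v' c := by
  intro off hoff h1 h2
  exact hm _ _ (hc off hoff h1 h2)

theorem stepA_inv {g0 : List (List Int)} {vs : List (Int × Int)} {n m : Int}
    (hpre : preShape g0 n m) {c : Int × Int}
    {st : List (List Int) × List (List Bool) × List (Int × Int)} {off : Int × Int}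
    (hoff : off ∈ offs) (hc : srcP vs st.2.1 c)
    (hinv : InvCore g0 vs n m st.1 st.2.1)
    (hq : ∀ d ∈ st.2.2, srcP vs st.2.1 d)
    (hcl : ∀ d, srcP vs st.2.1 d → d ∈ st.2.2 ∨ d = c ∨ closedAt g0 vs n m st.2.1 d) :
    InvCore g0 vs n m (stepA n m c st off).1 (stepA n m c st off).2.1 ∧
    (∀ d ∈ (stepA n m c st off).2.2, srcP vs (stepA n m c st off).2.1 d) ∧
    (∀ d, srcP vs (stepA n m c st off).2.1 d →
      d ∈ (stepA n m c st off).2.2 ∨ d = c ∨ closedAt g0 vs n m (stepA n m c st off).2.1 d) ∧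
    (∀ i j : Nat, atG st.2.1 false i j = true → atG (stepA n m c st off).2.1 false i j = true) ∧
    (∀ d ∈ st.2.2, d ∈ (stepA n m c st off).2.2) ∧
    (inG n m (nbr c off) → atG g0 0 (nbr c off).1.toNat (nbr c off).2.toNat = 0 →
      atG (stepA n m c st off).2.1 false (nbr c off).1.toNat (nbr c off).2.toNat = true) := by
  obtain ⟨hsh, hlen, hrows, hpt, hct, hsnd⟩ := hinv
  obtain ⟨hP1, hP2⟩ := hpre
  unfold stepA
  dsimp only
  simp only [nbr] at *
  split_ifs with h1 h2
  · -- a fresh clean cell (nx, ny) is infected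
    obtain ⟨hx0, hxn, hy0, hym⟩ := h1
    set i := (c.1 + off.1).toNat with hidef
    set j := (c.2 + off.2).toNat with hjdef
    have hin' : i < n.toNat := by omega
    have hjm' : j < m.toNat := by omega
    have hgi : i < st.1.length := by omega
    have hgj : j < (st.1.getD i []).length := by
      rw [hrows i]; have := hP2 i hin'; omega
    have hvi : i < st.2.1.length := by rw [hsh.1]; exact hin'
    have hvj : j < (st.2.1.getD i []).length := by
      rw [hsh.2 _ (getD_mem [] hvi)]; exact hjm'
    have hg0 : atG g0 0 i j = 0 := by
      have hp := hpt i j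
      rw [h2.2] at hp
      simp at hp
      rw [← hp]; exact h2.1
    have hinG : inG n m (c.1 + off.1, c.2 + off.2) := ⟨hx0, hxn, hy0, hym⟩
    have hreach : Reach g0 vs n m (c.1 + off.1, c.2 + off.2) := by
      rcases hc with hcv | ⟨hc1, hc2, hcm⟩
      · exact Reach.seed hcv hoff hinG hg0
      · have hr := hsnd _ _ hcm
        have hcc : ((c.1.toNat : Int), (c.2.toNat : Int)) = c := by
          rw [Int.toNat_of_nonneg hc1, Int.toNat_of_nonneg hc2]
        rw [hcc] at hr
        exact Reach.step hr hoff hinG hg0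
    have hmono : ∀ i' j' : Nat, atG st.2.1 false i' j' = true →
        atG (setG st.2.1 i j true) false i' j' = true := by
      intro i' j' h'
      by_cases hij : i = i' ∧ j = j'
      · rw [← hij.1, ← hij.2]; exact atG_setG_self false hvi hvj true
      · rw [atG_setG_ne false (by tauto) true]; exact h'
    refine ⟨⟨shapeV_setG hsh i j true, ?_, ?_, ?_, ?_, ?_⟩, ?_, ?_, hmono, ?_, ?_⟩
    · rw [length_setG]; exact hlen
    · intro i'; rw [rows_setG_length]; exact hrows i'
    · intro i' j'
      by_cases hij : i = i' ∧ j = j'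
      · rw [← hij.1, ← hij.2, atG_setG_self 0 hgi hgj 2, atG_setG_self false hvi hvj true]
        simp
      · rw [atG_setG_ne 0 (by tauto) 2, atG_setG_ne false (by tauto) true]
        exact hpt i' j'
    · have hA := ct2_setG (a := 2) (b := (0 : Int)) hgi hgj h2.1 (by norm_num)
      have h22 : (st.2.1.getD i []).getD j false = false := h2.2
      rw [getD_eq_elem hvj] at h22
      have hB := ct2_setG_add (b := true) hvi hvj
        (by rw [getD_eq_elem hvj, h22]; simp)
      show ct2 (setG st.1 i j 2) 0 + ct2 (setG st.2.1 i j true) true = ct2 g0 0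
      omega
    · intro i' j' h'
      by_cases hij : i = i' ∧ j = j'
      · have hco : (((i : Nat) : Int), ((j : Nat) : Int)) = (c.1 + off.1, c.2 + off.2) := by
          rw [hidef, hjdef, Int.toNat_of_nonneg hx0, Int.toNat_of_nonneg hy0]
        rw [← hij.1, ← hij.2, hco]
        exact hreach
      · rw [atG_setG_ne false (by tauto) true] at h'
        exact hsnd _ _ h'
    · intro d hd
      rcases List.mem_append.1 hd with hd | hd
      · exact srcP_mono hmono (hq d hd)
      · simp only [List.mem_singleton] at hd
        subst hd
        right
        exact ⟨hx0, hy0, atG_setG_self false hvi hvj true⟩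
    · intro d hd
      rcases hd with hdv | ⟨hd1, hd2, hdm⟩
      · rcases hcl d (Or.inl hdv) with h | h | h
        · exact Or.inl (List.mem_append.2 (Or.inl h))
        · exact Or.inr (Or.inl h)
        · exact Or.inr (Or.inr (closedAt_mono hmono h))
      · by_cases hij : d.1.toNat = i ∧ d.2.toNat = j
        · left
          have e1 : d.1 = c.1 + off.1 := by
            rw [← Int.toNat_of_nonneg hd1, hij.1, hidef, Int.toNat_of_nonneg hx0]
          have e2 : d.2 = c.2 + off.2 := by
            rw [← Int.toNat_of_nonneg hd2, hij.2, hjdef, Int.toNat_of_nonneg hy0]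
          have hdp : d = (c.1 + off.1, c.2 + off.2) := Prod.ext_iff.2 ⟨e1, e2⟩
          rw [hdp]
          exact List.mem_append.2 (Or.inr (by simp))
        · have hdm' : atG st.2.1 false d.1.toNat d.2.toNat = true := by
            rw [atG_setG_ne false (by tauto) true] at hdm
            exact hdm
          rcases hcl d (Or.inr ⟨hd1, hd2, hdm'⟩) with h | h | h
          · exact Or.inl (List.mem_append.2 (Or.inl h))
          · exact Or.inr (Or.inl h)
          · exact Or.inr (Or.inr (closedAt_mono hmono h))
    · intro d hd
      exact List.mem_append.2 (Or.inl hd)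
    · intro _ _
      exact atG_setG_self false hvi hvj true
  · -- bounds hold but the cell is not clean-and-unvisited: state unchanged
    refine ⟨⟨hsh, hlen, hrows, hpt, hct, hsnd⟩, hq, hcl, fun _ _ h => h, fun d hd => hd, ?_⟩
    intro _ hg0v
    cases hbv : atG st.2.1 false (c.1 + off.1).toNat (c.2 + off.2).toNat with
    | true => rfl
    | false =>
        exfalso
        apply h2
        refine ⟨?_, hbv⟩
        have hp := hpt (c.1 + off.1).toNat (c.2 + off.2).toNat
        rw [hbv] at hp
        simp at hp
        rw [hp]
        exact hg0v
  · -- out of bounds: state unchanged, nothing to show for this offset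
    refine ⟨⟨hsh, hlen, hrows, hpt, hct, hsnd⟩, hq, hcl, fun _ _ h => h, fun d hd => hd, ?_⟩
    intro hinG _
    exact absurd (by unfold inG at hinG; exact hinG) h1

theorem foldA_inv {g0 : List (List Int)} {vs : List (Int × Int)} {n m : Int}
    (hpre : preShape g0 n m) {c : Int × Int} :
    ∀ (L : List (Int × Int)), (∀ o ∈ L, o ∈ offs) →
    ∀ st : List (List Int) × List (List Bool) × List (Int × Int),
      srcP vs st.2.1 c →
      InvCore g0 vs n m st.1 st.2.1 →
      (∀ d ∈ st.2.2, srcP vs st.2.1 d) →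
      (∀ d, srcP vs st.2.1 d → d ∈ st.2.2 ∨ d = c ∨ closedAt g0 vs n m st.2.1 d) →
      InvCore g0 vs n m (L.foldl (stepA n m c) st).1 (L.foldl (stepA n m c) st).2.1 ∧
      (∀ d ∈ (L.foldl (stepA n m c) st).2.2, srcP vs (L.foldl (stepA n m c) st).2.1 d) ∧
      (∀ d, srcP vs (L.foldl (stepA n m c) st).2.1 d →
        d ∈ (L.foldl (stepA n m c) st).2.2 ∨ d = c ∨
          closedAt g0 vs n m (L.foldl (stepA n m c) st).2.1 d) ∧
      (∀ i j : Nat, atG st.2.1 false i j = true →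
        atG (L.foldl (stepA n m c) st).2.1 false i j = true) ∧
      (∀ o ∈ L, inG n m (nbr c o) → atG g0 0 (nbr c o).1.toNat (nbr c o).2.toNat = 0 →
        atG (L.foldl (stepA n m c) st).2.1 false (nbr c o).1.toNat (nbr c o).2.toNat = true) := by
  intro L
  induction L with
  | nil =>
      intro _ st hc hinv hq hcl
      exact ⟨hinv, hq, hcl, fun _ _ h => h, fun o ho => absurd ho (List.not_mem_nil)⟩
  | cons o t ih =>
      intro hL st hc hinv hq hcl
      have S := stepA_inv hpre (hL o List.mem_cons_self) hc hinv hq hcl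
      have hc1 : srcP vs (stepA n m c st o).2.1 c := srcP_mono S.2.2.2.1 hc
      have I := ih (fun o' ho' => hL o' (List.mem_cons_of_mem _ ho')) (stepA n m c st o)
        hc1 S.1 S.2.1 S.2.2.1
      simp only [List.foldl_cons]
      refine ⟨I.1, I.2.1, I.2.2.1, ?_, ?_⟩
      · intro i j h
        exact I.2.2.2.1 i j (S.2.2.2.1 i j h)
      · intro o' ho'
        rcases List.mem_cons.1 ho' with h | h
        · subst h
          intro hi hz
          exact I.2.2.2.1 _ _ (S.2.2.2.2.2 hi hz)
        · exact I.2.2.2.2 o' h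

theorem bfsLoop_master {g0 : List (List Int)} {vs : List (Int × Int)} {n m : Int}
    (hpre : preShape g0 n m) :
    ∀ (k : Nat) (g : List (List Int)) (v : List (List Bool)) (q : List (Int × Int))
      (hv : shapeV n m v), 5 * falseCt v + q.length ≤ k → InvA g0 vs n m g v q →
      ∃ v', shapeV n m v' ∧ InvA g0 vs n m (bfsLoop n m g v q hv) v' [] := by
  intro k
  induction k using Nat.strong_induction_on with
  | _ k ih =>
    intro g v q hv hk hinv
    match q with
    | [] => exact ⟨v, hv, by rw [bfsLoop]; exact hinv⟩
    | c :: rest =>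
      obtain ⟨hcore, hq, hcl⟩ := hinv
      have hsrc : srcP vs v c := hq c List.mem_cons_self
      have hcl' : ∀ d, srcP vs v d → d ∈ rest ∨ d = c ∨ closedAt g0 vs n m v d := by
        intro d hd
        rcases hcl d hd with h | h
        · rcases List.mem_cons.1 h with h | h
          · exact Or.inr (Or.inl h)
          · exact Or.inl h
        · exact Or.inr (Or.inr h)
      have hqs : ∀ d ∈ rest, srcP vs v d := fun d hd => hq d (List.mem_cons_of_mem _ hd)
      have F := foldA_inv hpre offs (fun o ho => ho) (g, v, rest) hsrc hcore hqs hcl'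
      have hinv' : InvA g0 vs n m (offs.foldl (stepA n m c) (g, v, rest)).1
          (offs.foldl (stepA n m c) (g, v, rest)).2.1
          (offs.foldl (stepA n m c) (g, v, rest)).2.2 := by
        refine ⟨F.1, F.2.1, ?_⟩
        intro d hd
        rcases F.2.2.1 d hd with h | h | h
        · exact Or.inl h
        · subst h
          exact Or.inr (fun off hoff hi hz => F.2.2.2.2 off hoff hi hz)
        · exact Or.inr h
      have hmeas : 5 * falseCt (offs.foldl (stepA n m c) (g, v, rest)).2.1 +
          (offs.foldl (stepA n m c) (g, v, rest)).2.2.length ≤ 5 * falseCt v + rest.length :=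
        foldl_stepA_measure (n := n) (m := m) (c := c) (L := offs) (st := (g, v, rest)) hv
      rw [bfsLoop]
      exact ih (5 * falseCt (offs.foldl (stepA n m c) (g, v, rest)).2.1 +
          (offs.foldl (stepA n m c) (g, v, rest)).2.2.length)
        (by simp only [List.length_cons] at hk; omega)
        _ _ _ (foldl_stepA_shape hv) (le_refl _) hinv'

theorem invA_init (g0 : List (List Int)) (vs : List (Int × Int)) (n m : Int) :
    InvA g0 vs n m g0 (List.replicate n.toNat (List.replicate m.toNat false)) vs := by
  refine ⟨⟨shapeV_replicate n m, rfl, fun i => rfl, ?_, ?_, ?_⟩, ?_, ?_⟩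
  · intro i j
    rw [atG_replicate_false]
    simp
  · rw [ct2_replicate_true]
    omega
  · intro i j h
    rw [atG_replicate_false] at h
    cases h
  · intro d hd
    exact Or.inl hd
  · intro d hd
    rcases hd with h | ⟨_, _, h⟩
    · exact Or.inl h
    · rw [atG_replicate_false] at h
      cases h

theorem bfs_char {g0 : List (List Int)} {vs : List (Int × Int)} {n m : Int}
    (hpre : preShape g0 n m) :
    ∃ vf, shapeV n m vf ∧
      (∀ i j : Nat, atG vf false i j = true → Reach g0 vs n m ((i : Int), (j : Int))) ∧
      (∀ p : Int × Int, Reach g0 vs n m p → atG vf false p.1.toNat p.2.toNat = true) ∧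
      bfs g0 vs n m + (ct2 vf true : Int) = (ct2 g0 0 : Int) := by
  obtain ⟨vf, hvf, hinvf⟩ := bfsLoop_master hpre
    (5 * falseCt (List.replicate n.toNat (List.replicate m.toNat false)) + vs.length)
    g0 _ vs (shapeV_replicate n m) (le_refl _) (invA_init g0 vs n m)
  refine ⟨vf, hvf, hinvf.1.2.2.2.2.2, ?_, ?_⟩
  · intro p hp
    induction hp with
    | seed hc hoff hi hz =>
        rcases hinvf.2.2 _ (Or.inl hc) with h | h
        · simp at h
        · exact h _ hoff hi hz
    | step hr hoff hi hz ihm =>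
        have hinGc := (reach_inG hr).1
        rcases hinvf.2.2 _ (Or.inr ⟨hinGc.1, hinGc.2.2.1, ihm⟩) with h | h
        · simp at h
        · exact h _ hoff hi hz
  · have hqinit : vs.foldl (fun q c => q ++ [c]) [] = vs := by
      rw [PySem.List.foldl_append_singleton_eq_self]
      exact List.nil_append vs
    show (let visited : List (List Bool) := List.replicate n.toNat (List.replicate m.toNat false);
      let queue : List (Int × Int) := vs.foldl (fun q c => q ++ [c]) [];
      let final := bfsLoop n m g0 visited queue (shapeV_replicate n m);
      final.foldl (fun acc row => acc + (PySem.List.count row 0 : Int)) 0) +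
        (ct2 vf true : Int) = (ct2 g0 0 : Int)
    simp only [hqinit]
    rw [foldl_count0]
    have hct := hinvf.1.2.2.2.2.1
    omega

-- ---------- B-side: the saturation sweep computes exactly the Reach set ----------

def condB (g : List (List Int)) (n m : Int) (s : PySem.Set (Int × Int)) (p : Int × Int) : Prop :=
  atG g 0 p.1.toNat p.2.toNat = 0 ∧ ¬ p ∈ s ∧
    (offs.any (fun off => inB n m (p.1 + off.1) (p.2 + off.2) &&
      decide ((p.1 + off.1, p.2 + off.2) ∈ s))) = true

def stepB (g : List (List Int)) (n m : Int) (st : PySem.Set (Int × Int) × Bool)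
    (p : Int × Int) : PySem.Set (Int × Int) × Bool :=
  if atG g 0 p.1.toNat p.2.toNat = 0 ∧ ¬ p ∈ st.1 ∧
      (offs.any (fun off => inB n m (p.1 + off.1) (p.2 + off.2) &&
        decide ((p.1 + off.1, p.2 + off.2) ∈ st.1))) = true then
    (PySem.Set.add st.1 p, true)
  else st

theorem stepB_pos {g : List (List Int)} {n m : Int} {st : PySem.Set (Int × Int) × Bool}
    {p : Int × Int} (hc : condB g n m st.1 p) :
    stepB g n m st p = (PySem.Set.add st.1 p, true) := by
  unfold stepB
  split_ifs with h
  · rfl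
  · exact absurd hc h

theorem stepB_neg {g : List (List Int)} {n m : Int} {st : PySem.Set (Int × Int) × Bool}
    {p : Int × Int} (hc : ¬ condB g n m st.1 p) : stepB g n m st p = st := by
  unfold stepB
  split_ifs with h
  · exact absurd h hc
  · rfl

theorem passB_eq (g : List (List Int)) (n m : Int) (s0 : PySem.Set (Int × Int)) :
    passB g n m s0 = (cells n m).foldl (stepB g n m) (s0, false) := by
  show _ = ((PySem.List.pyRange 0 n 1).flatMap
      (fun x => (PySem.List.pyRange 0 m 1).map (fun y => (x, y)))).foldl
      (stepB g n m) (s0, false)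
  rw [List.foldl_flatMap]
  unfold passB
  apply PySem.List.foldl_congr_mem
  intro acc x _
  rw [List.foldl_map]
  rfl

theorem foldB_flag (g : List (List Int)) (n m : Int) :
    ∀ (L : List (Int × Int)) (st : PySem.Set (Int × Int) × Bool), st.2 = true →
      (L.foldl (stepB g n m) st).2 = true := by
  intro L
  induction L with
  | nil => intro st h; exact h
  | cons p t ih =>
      intro st h
      simp only [List.foldl_cons]
      apply ih
      by_cases hc : condB g n m st.1 p
      · rw [stepB_pos hc]
      · rw [stepB_neg hc]
        exact h

theorem foldB_inv {g0 : List (List Int)} {vs : List (Int × Int)} {n m : Int} :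
    ∀ (L : List (Int × Int)), (∀ p ∈ L, inG n m p) →
    ∀ st : PySem.Set (Int × Int) × Bool, st.1.Nodup → (∀ c ∈ st.1, Reach g0 vs n m c) →
      (L.foldl (stepB g0 n m) st).1.Nodup ∧
      (∀ c ∈ (L.foldl (stepB g0 n m) st).1, Reach g0 vs n m c) ∧
      (∀ c ∈ st.1, c ∈ (L.foldl (stepB g0 n m) st).1) ∧
      st.1.length ≤ (L.foldl (stepB g0 n m) st).1.length ∧
      (st.2 = false → (L.foldl (stepB g0 n m) st).2 = true →
        st.1.length < (L.foldl (stepB g0 n m) st).1.length) := by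
  intro L
  induction L with
  | nil =>
      intro _ st h1 h2
      simp only [List.foldl_nil]
      exact ⟨h1, h2, fun c hc => hc, le_refl _, fun h h' => by rw [h] at h'; cases h'⟩
  | cons p t ih =>
      intro hL st h1 h2
      simp only [List.foldl_cons]
      by_cases hc : condB g0 n m st.1 p
      · have hstep : stepB g0 n m st p = (PySem.Set.add st.1 p, true) := stepB_pos hc
        have hpnot : p ∉ st.1 := hc.2.1
        have hreach : Reach g0 vs n m p := by
          obtain ⟨hz, _, hany⟩ := hc
          rw [List.any_eq_true] at hany
          obtain ⟨off, hoff, hb⟩ := hany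
          rw [Bool.and_eq_true, decide_eq_true_iff] at hb
          have hq := h2 _ hb.2
          have hpe : nbr (p.1 + off.1, p.2 + off.2) (-off.1, -off.2) = p := by
            cases p with
            | mk a b => simp [nbr]
          have := Reach.step (g := g0) (vs := vs) hq (offs_neg_mem hoff)
            (by rw [hpe]; exact inB_iff.1 hb.1 |> fun hbb => hL p List.mem_cons_self)
            (by rw [hpe]; exact hz)
          rw [hpe] at this
          exact this
        have hnd' : (PySem.Set.add st.1 p).Nodup := PySem.Set.nodup_add _ _ h1
        have hsnd' : ∀ c ∈ PySem.Set.add st.1 p, Reach g0 vs n m c := by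
          intro c hcm
          rcases (PySem.Set.mem_add _ _ _).1 hcm with h | h
          · exact h2 c h
          · exact h ▸ hreach
        have hlen' : (PySem.Set.add st.1 p).length = st.1.length + 1 := by
          rw [PySem.Set.add_of_not_mem hpnot, List.length_append]
          rfl
        rw [hstep]
        have I := ih (fun q hq => hL q (List.mem_cons_of_mem _ hq))
          (PySem.Set.add st.1 p, true) hnd' hsnd'
        have hA : ((PySem.Set.add st.1 p, true).1 : List (Int × Int)).length =
            st.1.length + 1 := hlen'
        refine ⟨I.1, I.2.1, ?_, ?_, ?_⟩
        · intro c hcm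
          exact I.2.2.1 c ((PySem.Set.mem_add _ _ _).2 (Or.inl hcm))
        · have := I.2.2.2.1
          omega
        · intro _ _
          have := I.2.2.2.1
          omega
      · rw [stepB_neg hc]
        exact ih (fun q hq => hL q (List.mem_cons_of_mem _ hq)) st h1 h2

theorem foldB_nochange (g : List (List Int)) (n m : Int) :
    ∀ (L : List (Int × Int)) (st : PySem.Set (Int × Int) × Bool),
      (L.foldl (stepB g n m) st).2 = false →
      (L.foldl (stepB g n m) st) = st ∧ ∀ p ∈ L, ¬ condB g n m st.1 p := by
  intro L
  induction L with
  | nil => intro st _; exact ⟨rfl, by simp⟩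
  | cons p t ih =>
      intro st hf
      simp only [List.foldl_cons] at hf ⊢
      by_cases hc : condB g n m st.1 p
      · exfalso
        rw [stepB_pos hc] at hf
        rw [foldB_flag g n m t _ rfl] at hf
        cases hf
      · rw [stepB_neg hc] at hf ⊢
        obtain ⟨he, hall⟩ := ih st hf
        refine ⟨he, ?_⟩
        intro q hq
        rcases List.mem_cons.1 hq with h | h
        · exact h ▸ hc
        · exact hall q h

theorem passB_closed {g0 : List (List Int)} {vs : List (Int × Int)} {n m : Int}
    {s : PySem.Set (Int × Int)} (hsound : ∀ c ∈ s, Reach g0 vs n m c)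
    (h : (passB g0 n m s).2 = false) :
    ∀ c ∈ s, ∀ off ∈ offs, inG n m (nbr c off) →
      atG g0 0 (nbr c off).1.toNat (nbr c off).2.toNat = 0 → nbr c off ∈ s := by
  rw [passB_eq] at h
  have H := (foldB_nochange g0 n m (cells n m) (s, false) h).2
  intro c hc off hoff hi hz
  by_contra hnb
  apply H (nbr c off) (mem_cells.2 hi)
  refine ⟨hz, hnb, ?_⟩
  rw [List.any_eq_true]
  refine ⟨(-off.1, -off.2), offs_neg_mem hoff, ?_⟩
  have e1 : (nbr c off).1 + -off.1 = c.1 := by simp [nbr]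
  have e2 : (nbr c off).2 + -off.2 = c.2 := by simp [nbr]
  rw [Bool.and_eq_true, decide_eq_true_iff, e1, e2]
  exact ⟨inB_iff.2 (reach_inG (hsound c hc)).1, hc⟩

theorem card_le_grid {n m : Int} {s : List (Int × Int)} (hnd : s.Nodup)
    (hin : ∀ c ∈ s, inG n m c) : s.length ≤ n.toNat * m.toNat := by
  have hsub : s ⊆ cells n m := fun c hc => mem_cells.2 (hin c hc)
  have := (hnd.subperm hsub).length_le
  rw [length_cells] at this
  exact this

def seedStep (g : List (List Int)) (n m : Int) (c : Int × Int)
    (s : PySem.Set (Int × Int)) (off : Int × Int) : PySem.Set (Int × Int) :=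
  let nx := c.1 + off.1
  let ny := c.2 + off.2
  if inB n m nx ny ∧ atG g 0 nx.toNat ny.toNat = 0 then PySem.Set.add s (nx, ny) else s

theorem seedsB_eq (g : List (List Int)) (n m : Int) (vs : List (Int × Int)) :
    seedsB g n m vs = vs.foldl (fun s c => offs.foldl (seedStep g n m c) s) PySem.Set.empty :=
  rfl

theorem seedStep_inv {g0 : List (List Int)} {vs : List (Int × Int)} {n m : Int} {c : Int × Int}
    (hc : c ∈ vs) :
    ∀ (O : List (Int × Int)), (∀ o ∈ O, o ∈ offs) →
    ∀ s : PySem.Set (Int × Int), s.Nodup → (∀ d ∈ s, Reach g0 vs n m d) →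
      (O.foldl (seedStep g0 n m c) s).Nodup ∧
      (∀ d ∈ O.foldl (seedStep g0 n m c) s, Reach g0 vs n m d) ∧
      (∀ d ∈ s, d ∈ O.foldl (seedStep g0 n m c) s) ∧
      (∀ o ∈ O, inG n m (nbr c o) → atG g0 0 (nbr c o).1.toNat (nbr c o).2.toNat = 0 →
        nbr c o ∈ O.foldl (seedStep g0 n m c) s) := by
  intro O
  induction O with
  | nil =>
      intro _ s h1 h2
      exact ⟨h1, h2, fun d hd => hd, by simp⟩
  | cons o t ih =>
      intro hO s h1 h2
      simp only [List.foldl_cons]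
      have hbranch : (seedStep g0 n m c s o).Nodup ∧
          (∀ d ∈ seedStep g0 n m c s o, Reach g0 vs n m d) ∧
          (∀ d ∈ s, d ∈ seedStep g0 n m c s o) ∧
          (inG n m (nbr c o) → atG g0 0 (nbr c o).1.toNat (nbr c o).2.toNat = 0 →
            nbr c o ∈ seedStep g0 n m c s o) := by
        unfold seedStep
        dsimp only
        split_ifs with hcond
        · refine ⟨PySem.Set.nodup_add _ _ h1, ?_, ?_, ?_⟩
          · intro d hd
            rcases (PySem.Set.mem_add _ _ _).1 hd with h | h
            · exact h2 d h
            · subst h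
              exact Reach.seed hc (hO o List.mem_cons_self) (inB_iff.1 hcond.1) hcond.2
          · intro d hd
            exact (PySem.Set.mem_add _ _ _).2 (Or.inl hd)
          · intro _ _
            exact (PySem.Set.mem_add _ _ _).2 (Or.inr rfl)
        · refine ⟨h1, h2, fun d hd => hd, ?_⟩
          intro hi hz
          exact absurd ⟨inB_iff.2 hi, hz⟩ hcond
      have I := ih (fun o' ho' => hO o' (List.mem_cons_of_mem _ ho')) _ hbranch.1 hbranch.2.1
      refine ⟨I.1, I.2.1, fun d hd => I.2.2.1 d (hbranch.2.2.1 d hd), ?_⟩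
      intro o' ho'
      rcases List.mem_cons.1 ho' with h | h
      · subst h
        intro hi hz
        exact I.2.2.1 _ (hbranch.2.2.2 hi hz)
      · exact I.2.2.2 o' h

theorem seedsB_master {g0 : List (List Int)} {n m : Int} {vs : List (Int × Int)} :
    (seedsB g0 n m vs).Nodup ∧ (∀ d ∈ seedsB g0 n m vs, Reach g0 vs n m d) ∧
    (∀ c ∈ vs, ∀ o ∈ offs, inG n m (nbr c o) →
      atG g0 0 (nbr c o).1.toNat (nbr c o).2.toNat = 0 → nbr c o ∈ seedsB g0 n m vs) := by
  rw [seedsB_eq]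
  suffices H : ∀ (V : List (Int × Int)), (∀ c ∈ V, c ∈ vs) →
      ∀ s : PySem.Set (Int × Int), s.Nodup → (∀ d ∈ s, Reach g0 vs n m d) →
      (V.foldl (fun s c => offs.foldl (seedStep g0 n m c) s) s).Nodup ∧
      (∀ d ∈ V.foldl (fun s c => offs.foldl (seedStep g0 n m c) s) s, Reach g0 vs n m d) ∧
      (∀ d ∈ s, d ∈ V.foldl (fun s c => offs.foldl (seedStep g0 n m c) s) s) ∧
      (∀ c ∈ V, ∀ o ∈ offs, inG n m (nbr c o) →
        atG g0 0 (nbr c o).1.toNat (nbr c o).2.toNat = 0 →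
        nbr c o ∈ V.foldl (fun s c => offs.foldl (seedStep g0 n m c) s) s) by
    have := H vs (fun c hc => hc) PySem.Set.empty (by simp [PySem.Set.empty]) (by simp [PySem.Set.empty])
    exact ⟨this.1, this.2.1, this.2.2.2⟩
  intro V
  induction V with
  | nil =>
      intro _ s h1 h2
      exact ⟨h1, h2, fun d hd => hd, by simp⟩
  | cons c t ih =>
      intro hV s h1 h2
      simp only [List.foldl_cons]
      have S := seedStep_inv (hV c List.mem_cons_self) offs (fun o ho => ho) s h1 h2
      have I := ih (fun c' hc' => hV c' (List.mem_cons_of_mem _ hc')) _ S.1 S.2.1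
      refine ⟨I.1, I.2.1, fun d hd => I.2.2.1 d (S.2.2.1 d hd), ?_⟩
      intro c' hc'
      rcases List.mem_cons.1 hc' with h | h
      · subst h
        intro o ho hi hz
        exact I.2.2.1 _ (S.2.2.2 o ho hi hz)
      · exact I.2.2.2 c' h

theorem satB_master {g0 : List (List Int)} {vs : List (Int × Int)} {n m : Int} :
    ∀ (fuel : Nat) (s : PySem.Set (Int × Int)), s.Nodup → (∀ c ∈ s, Reach g0 vs n m c) →
      n.toNat * m.toNat < fuel + s.length →
      (satB g0 n m fuel s).Nodup ∧
      (∀ c ∈ satB g0 n m fuel s, Reach g0 vs n m c) ∧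
      (∀ c ∈ s, c ∈ satB g0 n m fuel s) ∧
      (∀ c ∈ satB g0 n m fuel s, ∀ off ∈ offs, inG n m (nbr c off) →
        atG g0 0 (nbr c off).1.toNat (nbr c off).2.toNat = 0 →
        nbr c off ∈ satB g0 n m fuel s) := by
  intro fuel
  induction fuel with
  | zero =>
      intro s hnd hsnd hb
      exfalso
      have := card_le_grid hnd (fun c hc => (reach_inG (hsnd c hc)).1)
      omega
  | succ f ih =>
      intro s hnd hsnd hb
      have F := foldB_inv (g0 := g0) (vs := vs) (cells n m) (fun p hp => mem_cells.1 hp)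
        (s, false) hnd hsnd
      rw [satB, passB_eq]
      by_cases hch : ((cells n m).foldl (stepB g0 n m) (s, false)).2 = true
      · rw [if_pos hch]
        have hlt : s.length < ((cells n m).foldl (stepB g0 n m) (s, false)).1.length :=
          F.2.2.2.2 rfl hch
        have I := ih _ F.1 F.2.1 (by omega)
        exact ⟨I.1, I.2.1, fun c hc => I.2.2.1 c (F.2.2.1 c hc), I.2.2.2⟩
      · rw [if_neg hch]
        have hf : ((cells n m).foldl (stepB g0 n m) (s, false)).2 = false := by
          cases hcase : ((cells n m).foldl (stepB g0 n m) (s, false)).2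
          · rfl
          · exact absurd hcase hch
        have hN := foldB_nochange g0 n m (cells n m) (s, false) hf
        rw [hN.1]
        have hclosed : ∀ c ∈ s, ∀ off ∈ offs, inG n m (nbr c off) →
            atG g0 0 (nbr c off).1.toNat (nbr c off).2.toNat = 0 → nbr c off ∈ s := by
          apply passB_closed hsnd
          rw [passB_eq]
          exact hf
        exact ⟨hnd, hsnd, fun c hc => hc, hclosed⟩

theorem markCount {n m : Int} : ∀ (s : List (Int × Int)) (g : List (List Int)),
    s.Nodup → (∀ c ∈ s, inG n m c ∧ atG g 0 c.1.toNat c.2.toNat = 0) →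
    n.toNat ≤ g.length → (∀ i < n.toNat, m.toNat ≤ (g.getD i []).length) →
    ct2 (s.foldl (fun g c => setG g c.1.toNat c.2.toNat 2) g) 0 + s.length = ct2 g 0 := by
  intro s
  induction s with
  | nil =>
      intro g _ _ _ _
      simp
  | cons c t ih =>
      intro g hnd hprop hlen hrow
      obtain ⟨⟨hc1, hcn, hc2, hcm⟩, hz⟩ := hprop c List.mem_cons_self
      have hi : c.1.toNat < n.toNat := by omega
      have hj : c.2.toNat < m.toNat := by omega
      have hgi : c.1.toNat < g.length := by omega
      have hgj : c.2.toNat < (g.getD c.1.toNat []).length := by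
        have := hrow _ hi
        omega
      have hstep := ct2_setG (a := 2) (b := (0 : Int)) hgi hgj hz (by norm_num)
      simp only [List.foldl_cons]
      have IH := ih (setG g c.1.toNat c.2.toNat 2) (List.nodup_cons.1 hnd).2 ?_ ?_ ?_
      · simp only [List.length_cons]
        omega
      · intro d hd
        obtain ⟨hdG, hdz⟩ := hprop d (List.mem_cons_of_mem _ hd)
        refine ⟨hdG, ?_⟩
        have hdc : d ≠ c := by
          intro h
          exact (List.nodup_cons.1 hnd).1 (h ▸ hd)
        obtain ⟨hdG1, _, hdG2, _⟩ := hdG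
        have hne : c.1.toNat ≠ d.1.toNat ∨ c.2.toNat ≠ d.2.toNat := by
          rcases eq_or_ne c.1.toNat d.1.toNat with h1 | h1
          · rcases eq_or_ne c.2.toNat d.2.toNat with h2 | h2
            · exfalso
              apply hdc
              have e1 : d.1 = c.1 := by omega
              have e2 : d.2 = c.2 := by omega
              exact Prod.ext_iff.2 ⟨e1, e2⟩
            · exact Or.inr h2
          · exact Or.inl h1
        rw [atG_setG_ne 0 hne 2]
        exact hdz
      · rw [length_setG]
        exact hlen
      · intro i hi'
        rw [rows_setG_length]
        exact hrow i hi'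

theorem bfs_alt_char {g0 : List (List Int)} {vs : List (Int × Int)} {n m : Int}
    (hpre : preShape g0 n m) :
    ∃ s : List (Int × Int), s.Nodup ∧ (∀ c ∈ s, Reach g0 vs n m c) ∧
      (∀ p, Reach g0 vs n m p → p ∈ s) ∧
      bfs_alt g0 vs n m + (s.length : Int) = (ct2 g0 0 : Int) := by
  have Sd := seedsB_master (g0 := g0) (n := n) (m := m) (vs := vs)
  have M := satB_master (g0 := g0) (vs := vs) (n.toNat * m.toNat + 1) (seedsB g0 n m vs)
    Sd.1 Sd.2.1 (by omega)
  refine ⟨satB g0 n m (n.toNat * m.toNat + 1) (seedsB g0 n m vs), M.1, M.2.1, ?_, ?_⟩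
  · intro p hp
    induction hp with
    | seed hcv hoff hi hz => exact M.2.2.1 _ (Sd.2.2 _ hcv _ hoff hi hz)
    | step hr hoff hi hz ihm => exact M.2.2.2 _ ihm _ hoff hi hz
  · have MC := markCount (satB g0 n m (n.toNat * m.toNat + 1) (seedsB g0 n m vs)) g0 M.1
      (fun c hc => ⟨(reach_inG (M.2.1 c hc)).1, (reach_inG (M.2.1 c hc)).2⟩) hpre.1 hpre.2
    show (let infected := satB g0 n m (n.toNat * m.toNat + 1) (seedsB g0 n m vs);
      let final := infected.foldl (fun g c => setG g c.1.toNat c.2.toNat 2) g0;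
      final.foldl (fun acc row => acc + (PySem.List.count row 0 : Int)) 0) +
        ((satB g0 n m (n.toNat * m.toNat + 1) (seedsB g0 n m vs)).length : Int) =
        (ct2 g0 0 : Int)
    simp only
    rw [foldl_count0]
    omega

-- ---------- bridge: number of marked cells = size of the infected set ----------

theorem filter_product_length {α β : Type} (p : α × β → Bool) (L : List α) (R : List β) :
    ((L ×ˢ R).filter p).length =
      (L.map (fun x => ((R.filter (fun y => p (x, y)))).length)).sum := by
  induction L with
  | nil => rfl
  | cons x t ih =>
      show (((R.map (fun y => (x, y))) ++ t ×ˢ R).filter p).length = _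
      rw [List.filter_append, List.length_append, List.filter_map, List.length_map, ih]
      rfl

theorem range_filter_getD (l : List Bool) :
    ((List.range l.length).filter (fun k => l.getD k false)).length = l.count true := by
  induction l with
  | nil => simp
  | cons a t ih =>
      have hr : List.range (a :: t).length = 0 :: (List.range t.length).map Nat.succ := by
        simp [List.range_succ_eq_map]
      rw [hr, List.filter_cons, List.filter_map,
        show List.filter ((fun k => (a :: t).getD k false) ∘ Nat.succ) (List.range t.length) =
          List.filter (fun k => t.getD k false) (List.range t.length) from
          List.filter_congr (fun k _ => rfl)]
      simp only [List.getD_cons_zero]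
      simp only [List.getD_eq_getElem?_getD] at ih
      cases a
      · simp [ih]
      · simp [ih]

theorem pyRange_filter_row (m : Int) (l : List Bool) (hl : l.length = m.toNat) :
    ((PySem.List.pyRange 0 m 1).filter (fun y => l.getD y.toNat false)).length =
      l.count true := by
  rw [PySem.List.pyRange_one, List.filter_map, List.length_map]
  have hpred : ∀ k ∈ List.range (m - 0).toNat,
      ((fun y => l.getD y.toNat false) ∘ (fun k : Nat => (0 : Int) + k)) k =
        (fun k => l.getD k false) k := by
    intro k _
    simp [Function.comp]
  rw [List.filter_congr hpred]
  have : (m - 0).toNat = l.length := by omega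
  rw [this]
  exact range_filter_getD l

theorem sum_range_rows (v : List (List Bool)) :
    ((List.range v.length).map (fun k => (v.getD k []).count true)).sum = ct2 v true := by
  induction v with
  | nil => simp [ct2]
  | cons r t ih =>
      have hr : List.range (r :: t).length = 0 :: (List.range t.length).map Nat.succ := by
        simp [List.range_succ_eq_map]
      rw [hr]
      simp only [List.map_cons, List.map_map, List.sum_cons, List.getD_cons_zero]
      have hcmp : ((fun k => ((r :: t).getD k []).count true) ∘ Nat.succ) =
          fun k => (t.getD k []).count true := rfl
      rw [hcmp, ih]
      simp [ct2]

theorem ct2_true_filter {n m : Int} {v : List (List Bool)} (hsh : shapeV n m v) :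
    ((cells n m).filter (fun p => atG v false p.1.toNat p.2.toNat)).length = ct2 v true := by
  show (((PySem.List.pyRange 0 n 1) ×ˢ (PySem.List.pyRange 0 m 1)).filter
      (fun p => atG v false p.1.toNat p.2.toNat)).length = _
  rw [filter_product_length]
  have hrow : ∀ x ∈ PySem.List.pyRange 0 n 1,
      (((PySem.List.pyRange 0 m 1).filter
        (fun y => atG v false (x, y).1.toNat (x, y).2.toNat)).length) =
        (v.getD x.toNat []).count true := by
    intro x hx
    have hx' := PySem.List.mem_pyRange_one.1 hx
    have hxl : x.toNat < v.length := by rw [hsh.1]; omega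
    exact pyRange_filter_row m _ (hsh.2 _ (getD_mem [] hxl))
  rw [List.map_congr_left hrow]
  rw [PySem.List.pyRange_one, List.map_map]
  have hcmp : ∀ k ∈ List.range (n - 0).toNat,
      ((fun x : Int => (v.getD x.toNat []).count true) ∘ (fun k : Nat => (0 : Int) + k)) k =
        (fun k => (v.getD k []).count true) k := by
    intro k _
    simp [Function.comp]
  rw [List.map_congr_left hcmp]
  have : (n - 0).toNat = v.length := by rw [hsh.1]; omega
  rw [this]
  exact sum_range_rows v

theorem length_eq_filter_cells {n m : Int} {s : List (Int × Int)} (hnd : s.Nodup)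
    (hsub : ∀ p ∈ s, p ∈ cells n m) :
    s.length = ((cells n m).filter (fun p => decide (p ∈ s))).length := by
  have hperm : s.Perm ((cells n m).filter (fun p => decide (p ∈ s))) := by
    rw [List.perm_ext_iff_of_nodup hnd ((nodup_cells n m).filter _)]
    intro a
    simp only [List.mem_filter, decide_eq_true_iff]
    constructor
    · intro ha
      exact ⟨hsub a ha, ha⟩
    · intro ha
      exact ha.2
  exact hperm.length_eq

theorem counts_match {n m : Int} {vf : List (List Bool)} {s : List (Int × Int)}
    (hsh : shapeV n m vf) (hnds : s.Nodup)
    (hsub : ∀ p ∈ s, p ∈ cells n m)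
    (hiff : ∀ p ∈ cells n m, (atG vf false p.1.toNat p.2.toNat = true ↔ p ∈ s)) :
    ct2 vf true = s.length := by
  rw [← ct2_true_filter hsh, length_eq_filter_cells hnds hsub]
  congr 1
  apply List.filter_congr
  intro p hp
  rw [Bool.eq_iff_iff, decide_eq_true_iff]
  exact hiff p hp

-- ---------- degenerate grids (n ≤ 0 or m ≤ 0): neither program touches any cell ----------

theorem stepA_deg {n m : Int} (hdeg : n ≤ 0 ∨ m ≤ 0) (c : Int × Int)
    (st : List (List Int) × List (List Bool) × List (Int × Int)) (off : Int × Int) :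
    stepA n m c st off = st := by
  unfold stepA
  dsimp only
  rw [if_neg]
  intro h
  rcases h with ⟨h1, h2, h3, h4⟩
  rcases hdeg with h | h <;> omega

theorem foldA_deg {n m : Int} (hdeg : n ≤ 0 ∨ m ≤ 0) (c : Int × Int) :
    ∀ (L : List (Int × Int)) (st : List (List Int) × List (List Bool) × List (Int × Int)),
      L.foldl (stepA n m c) st = st := by
  intro L
  induction L with
  | nil => intro st; rfl
  | cons o t ih =>
      intro st
      rw [List.foldl_cons, stepA_deg hdeg, ih]

theorem bfsLoop_deg {n m : Int} (hdeg : n ≤ 0 ∨ m ≤ 0) :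
    ∀ (k : Nat) (q : List (Int × Int)) (g : List (List Int)) (v : List (List Bool))
      (hv : shapeV n m v), q.length ≤ k → bfsLoop n m g v q hv = g := by
  intro k
  induction k using Nat.strong_induction_on with
  | _ k ih =>
    intro q g v hv hk
    match q with
    | [] => rw [bfsLoop]
    | c :: rest =>
        rw [bfsLoop]
        simp only [foldA_deg hdeg c]
        exact ih rest.length (by simp only [List.length_cons] at hk; omega) rest g v hv
          (le_refl _)

theorem bfs_deg {g0 : List (List Int)} {vs : List (Int × Int)} {n m : Int}
    (hdeg : n ≤ 0 ∨ m ≤ 0) : bfs g0 vs n m = (ct2 g0 0 : Nat) := by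
  show (let visited : List (List Bool) := List.replicate n.toNat (List.replicate m.toNat false);
    let queue : List (Int × Int) := vs.foldl (fun q c => q ++ [c]) [];
    let final := bfsLoop n m g0 visited queue (shapeV_replicate n m);
    final.foldl (fun acc row => acc + (PySem.List.count row 0 : Int)) 0) = (ct2 g0 0 : Nat)
  simp only
  rw [bfsLoop_deg hdeg _ _ _ _ _ (le_refl _), foldl_count0]
  simp

theorem seedStep_deg {g : List (List Int)} {n m : Int} (hdeg : n ≤ 0 ∨ m ≤ 0)
    (c : Int × Int) (s : PySem.Set (Int × Int)) (off : Int × Int) :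
    seedStep g n m c s off = s := by
  unfold seedStep
  dsimp only
  rw [if_neg]
  intro h
  have hb := inB_iff.1 h.1
  rcases hdeg with h' | h' <;> omega

theorem seedsB_deg {g : List (List Int)} {n m : Int} {vs : List (Int × Int)}
    (hdeg : n ≤ 0 ∨ m ≤ 0) : seedsB g n m vs = PySem.Set.empty := by
  rw [seedsB_eq]
  have hin : ∀ (O : List (Int × Int)) (c : Int × Int) (s : PySem.Set (Int × Int)),
      O.foldl (seedStep g n m c) s = s := by
    intro O c
    induction O with
    | nil => intro s; rfl
    | cons o t ih => intro s; rw [List.foldl_cons, seedStep_deg hdeg, ih]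
  induction vs with
  | nil => rfl
  | cons c t ih => rw [List.foldl_cons, hin offs c, ih]

theorem passB_deg {g : List (List Int)} {n m : Int} (hdeg : n ≤ 0 ∨ m ≤ 0)
    (s : PySem.Set (Int × Int)) : passB g n m s = (s, false) := by
  rcases hdeg with h | h
  · unfold passB
    rw [PySem.List.pyRange_one_eq_nil (a := (0 : Int)) (b := n) (by omega)]
    rfl
  · unfold passB
    simp only [PySem.List.pyRange_one_eq_nil (show m ≤ (0 : Int) from h), List.foldl_nil]
    exact PySem.List.foldl_ignore _ _

theorem satB_deg {g : List (List Int)} {n m : Int} (hdeg : n ≤ 0 ∨ m ≤ 0) :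
    ∀ (fuel : Nat) (s : PySem.Set (Int × Int)), 0 < fuel → satB g n m fuel s = s := by
  intro fuel s hf
  match fuel, hf with
  | f + 1, _ =>
      rw [satB, passB_deg hdeg]
      simp

theorem bfs_alt_deg {g0 : List (List Int)} {vs : List (Int × Int)} {n m : Int}
    (hdeg : n ≤ 0 ∨ m ≤ 0) : bfs_alt g0 vs n m = (ct2 g0 0 : Nat) := by
  show (let infected := satB g0 n m (n.toNat * m.toNat + 1) (seedsB g0 n m vs);
    let final := infected.foldl (fun g c => setG g c.1.toNat c.2.toNat 2) g0;
    final.foldl (fun acc row => acc + (PySem.List.count row 0 : Int)) 0) = (ct2 g0 0 : Nat)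
  simp only
  rw [satB_deg hdeg _ _ (Nat.succ_pos _), seedsB_deg hdeg]
  show (([] : List (Int × Int)).foldl (fun g c => setG g c.1.toNat c.2.toNat 2) g0).foldl
      (fun acc row => acc + (PySem.List.count row 0 : Int)) 0 = (ct2 g0 0 : Nat)
  rw [List.foldl_nil, foldl_count0]
  simp

theorem pre_shape {g0 : List (List Int)} {vs : List (Int × Int)} {n m : Int}
    (hn : 0 < n) (hm : 0 < m) (hpre : Pre_bfs g0 vs n m) : preShape g0 n m := by
  rcases hpre with h | h | h
  · omega
  · omega
  · refine ⟨h.1, ?_⟩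
    intro i hi
    have hlen : i < g0.length := lt_of_lt_of_le hi h.1
    have htl : i < (g0.take n.toNat).length := by
      simp only [List.length_take]
      omega
    have hget : (g0.take n.toNat)[i] = g0[i] := List.getElem_take
    have hmem : g0[i] ∈ g0.take n.toNat := hget ▸ List.getElem_mem htl
    have := h.2 _ hmem
    rw [getD_eq_elem hlen]
    exact this

-- ===== VERDICT (by name: the statement is the Claim_ definition above) =====
theorem bfs_spec : Claim_equal_bfs := by
  unfold Claim_equal_bfs Spec_bfs
  intro map viruses n m hdom hpre
  by_cases hdeg : n ≤ 0 ∨ m ≤ 0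
  · rw [bfs_deg hdeg, bfs_alt_deg hdeg]
  · rw [not_or] at hdeg
    have hn : 0 < n := by omega
    have hm : 0 < m := by omega
    have hsh : preShape map n m := pre_shape hn hm hpre
    obtain ⟨vf, hvfsh, hsound, hcomp, hA⟩ := bfs_char (vs := viruses) hsh
    obtain ⟨s, hsnd, hsS, hsC, hB⟩ := bfs_alt_char (vs := viruses) hsh
    have hsub : ∀ p ∈ s, p ∈ cells n m := fun p hp => mem_cells.2 (reach_inG (hsS p hp)).1
    have hiff : ∀ p ∈ cells n m, (atG vf false p.1.toNat p.2.toNat = true ↔ p ∈ s) := by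
      intro p hp
      have hpin := mem_cells.1 hp
      constructor
      · intro hmk
        apply hsC
        have hr := hsound p.1.toNat p.2.toNat hmk
        have e : ((p.1.toNat : Int), (p.2.toNat : Int)) = p := by
          obtain ⟨h1, _, h2, _⟩ := hpin
          exact Prod.ext_iff.2 ⟨Int.toNat_of_nonneg h1, Int.toNat_of_nonneg h2⟩
        rwa [e] at hr
      · intro hms
        exact hcomp p (hsS p hms)
    have hc := counts_match hvfsh hsnd hsub hiff
    omega
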